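-- pv_equiv track=rewrite | github.com/delorenj/frontmatters | frontmatters/commands/organize.py | _determine_content_type
-- ===== SOURCE A (Python) =====
-- from typing import Dict, List, Set, Tuple, Optional
--
-- def _determine_content_type(filename: str, directory_parts: Tuple[str, ...], description: str) -> str:
--     """Determine the primary content type of the file."""
--     filename_lower = filename.lower()
--
--     # Check for specific patterns
--     if 'blog' in directory_parts or any(word in filename_lower for word in ['blog', 'post', 'article']):
--         return 'blog'
--     elif 'prompt' in directory_parts or 'prompt' in filename_lower:
--         return 'prompt'
--     elif 'agent' in directory_parts or 'agent' in filename_lower: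
--         return 'agent'
--     elif 'workflow' in directory_parts or 'workflow' in filename_lower:
--         return 'workflow'
--     elif 'research' in directory_parts or 'research' in filename_lower:
--         return 'research'
--     elif 'thread' in filename_lower or 'conversation' in filename_lower:
--         return 'thread'
--     elif any(word in filename_lower for word in ['config', 'settings']):
--         return 'configuration'
--     elif any(word in filename_lower for word in ['readme', 'guide', 'tutorial', 'doc']):
--         return 'documentation'
--     elif any(word in filename_lower for word in ['draft', 'wip', 'temp']):
--         return 'draft'
--     else:
--         return 'general'
-- ===== SOURCE B (Python) =====
-- def _determine_content_type(filename, directory_parts, description):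
--     """Inverted keyword index: scan all keywords, keep the best (lowest) priority seen."""
--     DIR_KEYS = [('blog', 0), ('prompt', 1), ('agent', 2), ('workflow', 3), ('research', 4)]
--     NAME_KEYS = [('blog', 0), ('post', 0), ('article', 0),
--                  ('prompt', 1), ('agent', 2), ('workflow', 3), ('research', 4),
--                  ('thread', 5), ('conversation', 5),
--                  ('config', 6), ('settings', 6),
--                  ('readme', 7), ('guide', 7), ('tutorial', 7), ('doc', 7),
--                  ('draft', 8), ('wip', 8), ('temp', 8)]
--     TYPES = ['blog', 'prompt', 'agent', 'workflow', 'research',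
--              'thread', 'configuration', 'documentation', 'draft', 'general']
--     filename_lower = filename.lower()
--     best = 9
--     for kw, p in DIR_KEYS:
--         if p < best and kw in directory_parts:
--             best = p
--     for kw, p in NAME_KEYS:
--         if p < best and kw in filename_lower:
--             best = p
--     return TYPES[best]
-- ===== Notes on version B (the rewrite author's own statement) =====
-- stated objective: alternative
-- what changed: Replaced the ordered nine-branch if/elif chain (first match returns) by an inverted keyword-to-priority index scanned exhaustively with a single min-priority accumulator, then one table lookup of the winning priority.
import Mathlib
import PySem

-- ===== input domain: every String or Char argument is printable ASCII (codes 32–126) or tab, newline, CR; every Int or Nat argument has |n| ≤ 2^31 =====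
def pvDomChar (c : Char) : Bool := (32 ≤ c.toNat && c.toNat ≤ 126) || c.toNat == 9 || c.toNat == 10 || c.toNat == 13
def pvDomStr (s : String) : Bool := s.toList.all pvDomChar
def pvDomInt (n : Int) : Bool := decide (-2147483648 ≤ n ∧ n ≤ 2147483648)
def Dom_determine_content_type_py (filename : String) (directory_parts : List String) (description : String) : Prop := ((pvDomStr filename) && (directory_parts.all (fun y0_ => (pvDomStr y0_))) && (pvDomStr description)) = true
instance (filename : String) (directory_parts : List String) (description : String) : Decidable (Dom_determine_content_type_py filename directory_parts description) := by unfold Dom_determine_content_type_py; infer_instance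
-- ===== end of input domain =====

-- B replaces A's ordered if/elif chain by an inverted keyword→priority index scanned with a
-- single min-priority accumulator (alternative decomposition; same cost).

-- ===== PORT A =====
def determine_content_type_py (filename : String) (directory_parts : List String) (description : String) : String :=
  let filename_lower := PySem.Str.lower filename
  if directory_parts.contains "blog" || ["blog", "post", "article"].any (fun word => PySem.Str.isIn word filename_lower) then "blog"
  else if directory_parts.contains "prompt" || PySem.Str.isIn "prompt" filename_lower then "prompt"
  else if directory_parts.contains "agent" || PySem.Str.isIn "agent" filename_lower then "agent"
  else if directory_parts.contains "workflow" || PySem.Str.isIn "workflow" filename_lower then "workflow"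
  else if directory_parts.contains "research" || PySem.Str.isIn "research" filename_lower then "research"
  else if PySem.Str.isIn "thread" filename_lower || PySem.Str.isIn "conversation" filename_lower then "thread"
  else if ["config", "settings"].any (fun word => PySem.Str.isIn word filename_lower) then "configuration"
  else if ["readme", "guide", "tutorial", "doc"].any (fun word => PySem.Str.isIn word filename_lower) then "documentation"
  else if ["draft", "wip", "temp"].any (fun word => PySem.Str.isIn word filename_lower) then "draft"
  else "general"

-- ===== PORT B =====
-- B-side helpers: the inverted keyword → priority indexes and the priority → type table
def ctDirKeys : List (String × Nat) :=
  [("blog", 0), ("prompt", 1), ("agent", 2), ("workflow", 3), ("research", 4)]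

def ctNameKeys : List (String × Nat) :=
  [("blog", 0), ("post", 0), ("article", 0),
   ("prompt", 1), ("agent", 2), ("workflow", 3), ("research", 4),
   ("thread", 5), ("conversation", 5),
   ("config", 6), ("settings", 6),
   ("readme", 7), ("guide", 7), ("tutorial", 7), ("doc", 7),
   ("draft", 8), ("wip", 8), ("temp", 8)]

def ctTypes : List String :=
  ["blog", "prompt", "agent", "workflow", "research",
   "thread", "configuration", "documentation", "draft", "general"]

def determine_content_type_py_alt (filename : String) (directory_parts : List String) (description : String) : String :=
  let filename_lower := PySem.Str.lower filename
  let best1 := ctDirKeys.foldl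
    (fun best kv => if kv.2 < best && directory_parts.contains kv.1 then kv.2 else best) 9
  let best2 := ctNameKeys.foldl
    (fun best kv => if kv.2 < best && PySem.Str.isIn kv.1 filename_lower then kv.2 else best) best1
  -- TYPES[best]: best is always ≤ 9, so the Python index is in range; getD is exact here
  ctTypes.getD best2 "general"

-- ===== PRECONDITION & SPEC =====
def Spec_determine_content_type_py (filename : String) (directory_parts : List String) (description : String) (out : String) : Prop := out = determine_content_type_py_alt filename directory_parts description
instance (filename : String) (directory_parts : List String) (description : String) (out : String) : Decidable (Spec_determine_content_type_py filename directory_parts description out) := by unfold Spec_determine_content_type_py; infer_instance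

-- ===== CLAIM (what is proved, stated in full; the proofs are below) =====
def Claim_equal_determine_content_type_py : Prop := ∀ (filename : String) (directory_parts : List String) (description : String), Dom_determine_content_type_py filename directory_parts description → Spec_determine_content_type_py filename directory_parts description (determine_content_type_py filename directory_parts description)

-- ===== LEMMAS AND PROOFS =====

-- step and prune lemmas for B's two keyword folds (evaluated one entry at a time
-- to keep proof terms small)
lemma dirConsTrue (dps : List String) (v : Nat) (k : String) (p : Nat) (l : List (String × Nat))
    (h : (p < v && dps.contains k) = true) :
    ((k, p) :: l).foldl (fun best kv => if kv.2 < best && dps.contains kv.1 then kv.2 else best) v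
    = l.foldl (fun best kv => if kv.2 < best && dps.contains kv.1 then kv.2 else best) p := by
  rw [List.foldl_cons, if_pos h]

lemma dirConsFalse (dps : List String) (v : Nat) (k : String) (p : Nat) (l : List (String × Nat))
    (h : (p < v && dps.contains k) = false) :
    ((k, p) :: l).foldl (fun best kv => if kv.2 < best && dps.contains kv.1 then kv.2 else best) v
    = l.foldl (fun best kv => if kv.2 < best && dps.contains kv.1 then kv.2 else best) v := by
  rw [List.foldl_cons, if_neg (by rw [h]; exact Bool.false_ne_true)]

lemma dirPrune (dps : List String) (v : Nat) (l : List (String × Nat)) (h : ∀ kv ∈ l, v ≤ kv.2) :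
    l.foldl (fun best kv => if kv.2 < best && dps.contains kv.1 then kv.2 else best) v = v := by
  induction l with
  | nil => rfl
  | cons kv l ih =>
    have h1 : v ≤ kv.2 := h kv (List.mem_cons_self)
    have hc : (kv.2 < v && dps.contains kv.1) = false := by
      rw [decide_eq_false (by omega : ¬ kv.2 < v), Bool.false_and]
    rw [List.foldl_cons, if_neg (by rw [hc]; exact Bool.false_ne_true)]
    exact ih (fun kv hm => h kv (List.mem_cons_of_mem _ hm))

lemma nameConsTrue (fl : String) (v : Nat) (k : String) (p : Nat) (l : List (String × Nat))
    (h : (p < v && PySem.Str.isIn k fl) = true) :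
    ((k, p) :: l).foldl (fun best kv => if kv.2 < best && PySem.Str.isIn kv.1 fl then kv.2 else best) v
    = l.foldl (fun best kv => if kv.2 < best && PySem.Str.isIn kv.1 fl then kv.2 else best) p := by
  rw [List.foldl_cons, if_pos h]

lemma nameConsFalse (fl : String) (v : Nat) (k : String) (p : Nat) (l : List (String × Nat))
    (h : (p < v && PySem.Str.isIn k fl) = false) :
    ((k, p) :: l).foldl (fun best kv => if kv.2 < best && PySem.Str.isIn kv.1 fl then kv.2 else best) v
    = l.foldl (fun best kv => if kv.2 < best && PySem.Str.isIn kv.1 fl then kv.2 else best) v := by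
  rw [List.foldl_cons, if_neg (by rw [h]; exact Bool.false_ne_true)]

lemma namePrune (fl : String) (v : Nat) (l : List (String × Nat)) (h : ∀ kv ∈ l, v ≤ kv.2) :
    l.foldl (fun best kv => if kv.2 < best && PySem.Str.isIn kv.1 fl then kv.2 else best) v = v := by
  induction l with
  | nil => rfl
  | cons kv l ih =>
    have h1 : v ≤ kv.2 := h kv (List.mem_cons_self)
    have hc : (kv.2 < v && PySem.Str.isIn kv.1 fl) = false := by
      rw [decide_eq_false (by omega : ¬ kv.2 < v), Bool.false_and]
    rw [List.foldl_cons, if_neg (by rw [hc]; exact Bool.false_ne_true)]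
    exact ih (fun kv hm => h kv (List.mem_cons_of_mem _ hm))

-- characterization of the directory-keyword fold
lemma ctDirChar (dps : List String) :
    ctDirKeys.foldl (fun best kv => if kv.2 < best && dps.contains kv.1 then kv.2 else best) 9
    = (if dps.contains "blog" then 0
    else if dps.contains "prompt" then 1
    else if dps.contains "agent" then 2
    else if dps.contains "workflow" then 3
    else if dps.contains "research" then 4
    else 9) := by
  unfold ctDirKeys
  by_cases h0 : dps.contains "blog" = true
  · rw [dirConsTrue _ _ _ _ _ (by rw [h0]; decide), dirPrune _ _ _ (by decide)]
    simp only [Bool.false_eq_true, eq_self_iff_true, if_true, if_false, h0] <;> rfl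
  rw [Bool.not_eq_true] at h0
  rw [dirConsFalse _ _ _ _ _ (by rw [h0]; decide)]
  by_cases h1 : dps.contains "prompt" = true
  · rw [dirConsTrue _ _ _ _ _ (by rw [h1]; decide), dirPrune _ _ _ (by decide)]
    simp only [Bool.false_eq_true, eq_self_iff_true, if_true, if_false, h0, h1] <;> rfl
  rw [Bool.not_eq_true] at h1
  rw [dirConsFalse _ _ _ _ _ (by rw [h1]; decide)]
  by_cases h2 : dps.contains "agent" = true
  · rw [dirConsTrue _ _ _ _ _ (by rw [h2]; decide), dirPrune _ _ _ (by decide)]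
    simp only [Bool.false_eq_true, eq_self_iff_true, if_true, if_false, h0, h1, h2] <;> rfl
  rw [Bool.not_eq_true] at h2
  rw [dirConsFalse _ _ _ _ _ (by rw [h2]; decide)]
  by_cases h3 : dps.contains "workflow" = true
  · rw [dirConsTrue _ _ _ _ _ (by rw [h3]; decide), dirPrune _ _ _ (by decide)]
    simp only [Bool.false_eq_true, eq_self_iff_true, if_true, if_false, h0, h1, h2, h3] <;> rfl
  rw [Bool.not_eq_true] at h3
  rw [dirConsFalse _ _ _ _ _ (by rw [h3]; decide)]
  by_cases h4 : dps.contains "research" = true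
  · rw [dirConsTrue _ _ _ _ _ (by rw [h4]; decide), dirPrune _ _ _ (by decide)]
    simp only [Bool.false_eq_true, eq_self_iff_true, if_true, if_false, h0, h1, h2, h3, h4] <;> rfl
  rw [Bool.not_eq_true] at h4
  rw [dirConsFalse _ _ _ _ _ (by rw [h4]; decide)]
  rw [List.foldl_nil]
  simp only [Bool.false_eq_true, eq_self_iff_true, if_true, if_false, h0, h1, h2, h3, h4] <;> rfl

-- characterization of the filename-keyword fold
lemma ctNameChar (fl : String) (v : Nat) :
    ctNameKeys.foldl (fun best kv => if kv.2 < best && PySem.Str.isIn kv.1 fl then kv.2 else best) v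
    = (if 0 < v && PySem.Str.isIn "blog" fl then 0
    else if 0 < v && PySem.Str.isIn "post" fl then 0
    else if 0 < v && PySem.Str.isIn "article" fl then 0
    else if 1 < v && PySem.Str.isIn "prompt" fl then 1
    else if 2 < v && PySem.Str.isIn "agent" fl then 2
    else if 3 < v && PySem.Str.isIn "workflow" fl then 3
    else if 4 < v && PySem.Str.isIn "research" fl then 4
    else if 5 < v && PySem.Str.isIn "thread" fl then 5
    else if 5 < v && PySem.Str.isIn "conversation" fl then 5
    else if 6 < v && PySem.Str.isIn "config" fl then 6
    else if 6 < v && PySem.Str.isIn "settings" fl then 6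
    else if 7 < v && PySem.Str.isIn "readme" fl then 7
    else if 7 < v && PySem.Str.isIn "guide" fl then 7
    else if 7 < v && PySem.Str.isIn "tutorial" fl then 7
    else if 7 < v && PySem.Str.isIn "doc" fl then 7
    else if 8 < v && PySem.Str.isIn "draft" fl then 8
    else if 8 < v && PySem.Str.isIn "wip" fl then 8
    else if 8 < v && PySem.Str.isIn "temp" fl then 8
    else v) := by
  unfold ctNameKeys
  by_cases h0 : (0 < v && PySem.Str.isIn "blog" fl) = true
  · rw [nameConsTrue _ _ _ _ _ h0, namePrune _ _ _ (by decide)]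
    simp only [Bool.false_eq_true, eq_self_iff_true, if_true, if_false, h0] <;> rfl
  rw [Bool.not_eq_true] at h0
  rw [nameConsFalse _ _ _ _ _ h0]
  by_cases h1 : (0 < v && PySem.Str.isIn "post" fl) = true
  · rw [nameConsTrue _ _ _ _ _ h1, namePrune _ _ _ (by decide)]
    simp only [Bool.false_eq_true, eq_self_iff_true, if_true, if_false, h0, h1] <;> rfl
  rw [Bool.not_eq_true] at h1
  rw [nameConsFalse _ _ _ _ _ h1]
  by_cases h2 : (0 < v && PySem.Str.isIn "article" fl) = true
  · rw [nameConsTrue _ _ _ _ _ h2, namePrune _ _ _ (by decide)]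
    simp only [Bool.false_eq_true, eq_self_iff_true, if_true, if_false, h0, h1, h2] <;> rfl
  rw [Bool.not_eq_true] at h2
  rw [nameConsFalse _ _ _ _ _ h2]
  by_cases h3 : (1 < v && PySem.Str.isIn "prompt" fl) = true
  · rw [nameConsTrue _ _ _ _ _ h3, namePrune _ _ _ (by decide)]
    simp only [Bool.false_eq_true, eq_self_iff_true, if_true, if_false, h0, h1, h2, h3] <;> rfl
  rw [Bool.not_eq_true] at h3
  rw [nameConsFalse _ _ _ _ _ h3]
  by_cases h4 : (2 < v && PySem.Str.isIn "agent" fl) = true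
  · rw [nameConsTrue _ _ _ _ _ h4, namePrune _ _ _ (by decide)]
    simp only [Bool.false_eq_true, eq_self_iff_true, if_true, if_false, h0, h1, h2, h3, h4] <;> rfl
  rw [Bool.not_eq_true] at h4
  rw [nameConsFalse _ _ _ _ _ h4]
  by_cases h5 : (3 < v && PySem.Str.isIn "workflow" fl) = true
  · rw [nameConsTrue _ _ _ _ _ h5, namePrune _ _ _ (by decide)]
    simp only [Bool.false_eq_true, eq_self_iff_true, if_true, if_false, h0, h1, h2, h3, h4, h5] <;> rfl
  rw [Bool.not_eq_true] at h5
  rw [nameConsFalse _ _ _ _ _ h5]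
  by_cases h6 : (4 < v && PySem.Str.isIn "research" fl) = true
  · rw [nameConsTrue _ _ _ _ _ h6, namePrune _ _ _ (by decide)]
    simp only [Bool.false_eq_true, eq_self_iff_true, if_true, if_false, h0, h1, h2, h3, h4, h5, h6] <;> rfl
  rw [Bool.not_eq_true] at h6
  rw [nameConsFalse _ _ _ _ _ h6]
  by_cases h7 : (5 < v && PySem.Str.isIn "thread" fl) = true
  · rw [nameConsTrue _ _ _ _ _ h7, namePrune _ _ _ (by decide)]
    simp only [Bool.false_eq_true, eq_self_iff_true, if_true, if_false, h0, h1, h2, h3, h4, h5, h6, h7] <;> rfl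
  rw [Bool.not_eq_true] at h7
  rw [nameConsFalse _ _ _ _ _ h7]
  by_cases h8 : (5 < v && PySem.Str.isIn "conversation" fl) = true
  · rw [nameConsTrue _ _ _ _ _ h8, namePrune _ _ _ (by decide)]
    simp only [Bool.false_eq_true, eq_self_iff_true, if_true, if_false, h0, h1, h2, h3, h4, h5, h6, h7, h8] <;> rfl
  rw [Bool.not_eq_true] at h8
  rw [nameConsFalse _ _ _ _ _ h8]
  by_cases h9 : (6 < v && PySem.Str.isIn "config" fl) = true
  · rw [nameConsTrue _ _ _ _ _ h9, namePrune _ _ _ (by decide)]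
    simp only [Bool.false_eq_true, eq_self_iff_true, if_true, if_false, h0, h1, h2, h3, h4, h5, h6, h7, h8, h9] <;> rfl
  rw [Bool.not_eq_true] at h9
  rw [nameConsFalse _ _ _ _ _ h9]
  by_cases h10 : (6 < v && PySem.Str.isIn "settings" fl) = true
  · rw [nameConsTrue _ _ _ _ _ h10, namePrune _ _ _ (by decide)]
    simp only [Bool.false_eq_true, eq_self_iff_true, if_true, if_false, h0, h1, h2, h3, h4, h5, h6, h7, h8, h9, h10] <;> rfl
  rw [Bool.not_eq_true] at h10
  rw [nameConsFalse _ _ _ _ _ h10]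
  by_cases h11 : (7 < v && PySem.Str.isIn "readme" fl) = true
  · rw [nameConsTrue _ _ _ _ _ h11, namePrune _ _ _ (by decide)]
    simp only [Bool.false_eq_true, eq_self_iff_true, if_true, if_false, h0, h1, h2, h3, h4, h5, h6, h7, h8, h9, h10, h11] <;> rfl
  rw [Bool.not_eq_true] at h11
  rw [nameConsFalse _ _ _ _ _ h11]
  by_cases h12 : (7 < v && PySem.Str.isIn "guide" fl) = true
  · rw [nameConsTrue _ _ _ _ _ h12, namePrune _ _ _ (by decide)]
    simp only [Bool.false_eq_true, eq_self_iff_true, if_true, if_false, h0, h1, h2, h3, h4, h5, h6, h7, h8, h9, h10, h11, h12] <;> rfl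
  rw [Bool.not_eq_true] at h12
  rw [nameConsFalse _ _ _ _ _ h12]
  by_cases h13 : (7 < v && PySem.Str.isIn "tutorial" fl) = true
  · rw [nameConsTrue _ _ _ _ _ h13, namePrune _ _ _ (by decide)]
    simp only [Bool.false_eq_true, eq_self_iff_true, if_true, if_false, h0, h1, h2, h3, h4, h5, h6, h7, h8, h9, h10, h11, h12, h13] <;> rfl
  rw [Bool.not_eq_true] at h13
  rw [nameConsFalse _ _ _ _ _ h13]
  by_cases h14 : (7 < v && PySem.Str.isIn "doc" fl) = true
  · rw [nameConsTrue _ _ _ _ _ h14, namePrune _ _ _ (by decide)]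
    simp only [Bool.false_eq_true, eq_self_iff_true, if_true, if_false, h0, h1, h2, h3, h4, h5, h6, h7, h8, h9, h10, h11, h12, h13, h14] <;> rfl
  rw [Bool.not_eq_true] at h14
  rw [nameConsFalse _ _ _ _ _ h14]
  by_cases h15 : (8 < v && PySem.Str.isIn "draft" fl) = true
  · rw [nameConsTrue _ _ _ _ _ h15, namePrune _ _ _ (by decide)]
    simp only [Bool.false_eq_true, eq_self_iff_true, if_true, if_false, h0, h1, h2, h3, h4, h5, h6, h7, h8, h9, h10, h11, h12, h13, h14, h15] <;> rfl
  rw [Bool.not_eq_true] at h15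
  rw [nameConsFalse _ _ _ _ _ h15]
  by_cases h16 : (8 < v && PySem.Str.isIn "wip" fl) = true
  · rw [nameConsTrue _ _ _ _ _ h16, namePrune _ _ _ (by decide)]
    simp only [Bool.false_eq_true, eq_self_iff_true, if_true, if_false, h0, h1, h2, h3, h4, h5, h6, h7, h8, h9, h10, h11, h12, h13, h14, h15, h16] <;> rfl
  rw [Bool.not_eq_true] at h16
  rw [nameConsFalse _ _ _ _ _ h16]
  by_cases h17 : (8 < v && PySem.Str.isIn "temp" fl) = true
  · rw [nameConsTrue _ _ _ _ _ h17, namePrune _ _ _ (by decide)]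
    simp only [Bool.false_eq_true, eq_self_iff_true, if_true, if_false, h0, h1, h2, h3, h4, h5, h6, h7, h8, h9, h10, h11, h12, h13, h14, h15, h16, h17] <;> rfl
  rw [Bool.not_eq_true] at h17
  rw [nameConsFalse _ _ _ _ _ h17]
  rw [List.foldl_nil]
  simp only [Bool.false_eq_true, eq_self_iff_true, if_true, if_false, h0, h1, h2, h3, h4, h5, h6, h7, h8, h9, h10, h11, h12, h13, h14, h15, h16, h17] <;> rfl

theorem determine_content_type_py_spec : Claim_equal_determine_content_type_py := by
  intro filename directory_parts description hDom
  clear hDom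
  simp only [Spec_determine_content_type_py, determine_content_type_py, determine_content_type_py_alt]
  rw [ctDirChar, ctNameChar]
  by_cases hd_blog : directory_parts.contains "blog" = true
  · (simp only [List.any_cons, List.any_nil, hd_blog]; rfl)
  rw [Bool.not_eq_true] at hd_blog
  by_cases hd_prompt : directory_parts.contains "prompt" = true
  · by_cases hn1_blog : PySem.Str.isIn "blog" (PySem.Str.lower filename) = true
    · (simp only [List.any_cons, List.any_nil, hd_blog, hd_prompt, hn1_blog]; rfl)
    rw [Bool.not_eq_true] at hn1_blog
    by_cases hn1_post : PySem.Str.isIn "post" (PySem.Str.lower filename) = true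
    · (simp only [List.any_cons, List.any_nil, hd_blog, hd_prompt, hn1_blog, hn1_post]; rfl)
    rw [Bool.not_eq_true] at hn1_post
    by_cases hn1_article : PySem.Str.isIn "article" (PySem.Str.lower filename) = true
    · (simp only [List.any_cons, List.any_nil, hd_blog, hd_prompt, hn1_blog, hn1_post, hn1_article]; rfl)
    rw [Bool.not_eq_true] at hn1_article
    (simp only [List.any_cons, List.any_nil, hd_blog, hd_prompt, hn1_blog, hn1_post, hn1_article]; rfl)
  rw [Bool.not_eq_true] at hd_prompt
  by_cases hd_agent : directory_parts.contains "agent" = true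
  · by_cases hn2_blog : PySem.Str.isIn "blog" (PySem.Str.lower filename) = true
    · (simp only [List.any_cons, List.any_nil, hd_blog, hd_prompt, hd_agent, hn2_blog]; rfl)
    rw [Bool.not_eq_true] at hn2_blog
    by_cases hn2_post : PySem.Str.isIn "post" (PySem.Str.lower filename) = true
    · (simp only [List.any_cons, List.any_nil, hd_blog, hd_prompt, hd_agent, hn2_blog, hn2_post]; rfl)
    rw [Bool.not_eq_true] at hn2_post
    by_cases hn2_article : PySem.Str.isIn "article" (PySem.Str.lower filename) = true
    · (simp only [List.any_cons, List.any_nil, hd_blog, hd_prompt, hd_agent, hn2_blog, hn2_post, hn2_article]; rfl)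
    rw [Bool.not_eq_true] at hn2_article
    by_cases hn2_prompt : PySem.Str.isIn "prompt" (PySem.Str.lower filename) = true
    · (simp only [List.any_cons, List.any_nil, hd_blog, hd_prompt, hd_agent, hn2_blog, hn2_post, hn2_article, hn2_prompt]; rfl)
    rw [Bool.not_eq_true] at hn2_prompt
    (simp only [List.any_cons, List.any_nil, hd_blog, hd_prompt, hd_agent, hn2_blog, hn2_post, hn2_article, hn2_prompt]; rfl)
  rw [Bool.not_eq_true] at hd_agent
  by_cases hd_workflow : directory_parts.contains "workflow" = true
  · by_cases hn3_blog : PySem.Str.isIn "blog" (PySem.Str.lower filename) = true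
    · (simp only [List.any_cons, List.any_nil, hd_blog, hd_prompt, hd_agent, hd_workflow, hn3_blog]; rfl)
    rw [Bool.not_eq_true] at hn3_blog
    by_cases hn3_post : PySem.Str.isIn "post" (PySem.Str.lower filename) = true
    · (simp only [List.any_cons, List.any_nil, hd_blog, hd_prompt, hd_agent, hd_workflow, hn3_blog, hn3_post]; rfl)
    rw [Bool.not_eq_true] at hn3_post
    by_cases hn3_article : PySem.Str.isIn "article" (PySem.Str.lower filename) = true
    · (simp only [List.any_cons, List.any_nil, hd_blog, hd_prompt, hd_agent, hd_workflow, hn3_blog, hn3_post, hn3_article]; rfl)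
    rw [Bool.not_eq_true] at hn3_article
    by_cases hn3_prompt : PySem.Str.isIn "prompt" (PySem.Str.lower filename) = true
    · (simp only [List.any_cons, List.any_nil, hd_blog, hd_prompt, hd_agent, hd_workflow, hn3_blog, hn3_post, hn3_article, hn3_prompt]; rfl)
    rw [Bool.not_eq_true] at hn3_prompt
    by_cases hn3_agent : PySem.Str.isIn "agent" (PySem.Str.lower filename) = true
    · (simp only [List.any_cons, List.any_nil, hd_blog, hd_prompt, hd_agent, hd_workflow, hn3_blog, hn3_post, hn3_article, hn3_prompt, hn3_agent]; rfl)
    rw [Bool.not_eq_true] at hn3_agent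
    (simp only [List.any_cons, List.any_nil, hd_blog, hd_prompt, hd_agent, hd_workflow, hn3_blog, hn3_post, hn3_article, hn3_prompt, hn3_agent]; rfl)
  rw [Bool.not_eq_true] at hd_workflow
  by_cases hd_research : directory_parts.contains "research" = true
  · by_cases hn4_blog : PySem.Str.isIn "blog" (PySem.Str.lower filename) = true
    · (simp only [List.any_cons, List.any_nil, hd_blog, hd_prompt, hd_agent, hd_workflow, hd_research, hn4_blog]; rfl)
    rw [Bool.not_eq_true] at hn4_blog
    by_cases hn4_post : PySem.Str.isIn "post" (PySem.Str.lower filename) = true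
    · (simp only [List.any_cons, List.any_nil, hd_blog, hd_prompt, hd_agent, hd_workflow, hd_research, hn4_blog, hn4_post]; rfl)
    rw [Bool.not_eq_true] at hn4_post
    by_cases hn4_article : PySem.Str.isIn "article" (PySem.Str.lower filename) = true
    · (simp only [List.any_cons, List.any_nil, hd_blog, hd_prompt, hd_agent, hd_workflow, hd_research, hn4_blog, hn4_post, hn4_article]; rfl)
    rw [Bool.not_eq_true] at hn4_article
    by_cases hn4_prompt : PySem.Str.isIn "prompt" (PySem.Str.lower filename) = true
    · (simp only [List.any_cons, List.any_nil, hd_blog, hd_prompt, hd_agent, hd_workflow, hd_research, hn4_blog, hn4_post, hn4_article, hn4_prompt]; rfl)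
    rw [Bool.not_eq_true] at hn4_prompt
    by_cases hn4_agent : PySem.Str.isIn "agent" (PySem.Str.lower filename) = true
    · (simp only [List.any_cons, List.any_nil, hd_blog, hd_prompt, hd_agent, hd_workflow, hd_research, hn4_blog, hn4_post, hn4_article, hn4_prompt, hn4_agent]; rfl)
    rw [Bool.not_eq_true] at hn4_agent
    by_cases hn4_workflow : PySem.Str.isIn "workflow" (PySem.Str.lower filename) = true
    · (simp only [List.any_cons, List.any_nil, hd_blog, hd_prompt, hd_agent, hd_workflow, hd_research, hn4_blog, hn4_post, hn4_article, hn4_prompt, hn4_agent, hn4_workflow]; rfl)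
    rw [Bool.not_eq_true] at hn4_workflow
    (simp only [List.any_cons, List.any_nil, hd_blog, hd_prompt, hd_agent, hd_workflow, hd_research, hn4_blog, hn4_post, hn4_article, hn4_prompt, hn4_agent, hn4_workflow]; rfl)
  rw [Bool.not_eq_true] at hd_research
  by_cases hn_blog : PySem.Str.isIn "blog" (PySem.Str.lower filename) = true
  · (simp only [List.any_cons, List.any_nil, hd_blog, hd_prompt, hd_agent, hd_workflow, hd_research, hn_blog]; rfl)
  rw [Bool.not_eq_true] at hn_blog
  by_cases hn_post : PySem.Str.isIn "post" (PySem.Str.lower filename) = true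
  · (simp only [List.any_cons, List.any_nil, hd_blog, hd_prompt, hd_agent, hd_workflow, hd_research, hn_blog, hn_post]; rfl)
  rw [Bool.not_eq_true] at hn_post
  by_cases hn_article : PySem.Str.isIn "article" (PySem.Str.lower filename) = true
  · (simp only [List.any_cons, List.any_nil, hd_blog, hd_prompt, hd_agent, hd_workflow, hd_research, hn_blog, hn_post, hn_article]; rfl)
  rw [Bool.not_eq_true] at hn_article
  by_cases hn_prompt : PySem.Str.isIn "prompt" (PySem.Str.lower filename) = true
  · (simp only [List.any_cons, List.any_nil, hd_blog, hd_prompt, hd_agent, hd_workflow, hd_research, hn_blog, hn_post, hn_article, hn_prompt]; rfl)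
  rw [Bool.not_eq_true] at hn_prompt
  by_cases hn_agent : PySem.Str.isIn "agent" (PySem.Str.lower filename) = true
  · (simp only [List.any_cons, List.any_nil, hd_blog, hd_prompt, hd_agent, hd_workflow, hd_research, hn_blog, hn_post, hn_article, hn_prompt, hn_agent]; rfl)
  rw [Bool.not_eq_true] at hn_agent
  by_cases hn_workflow : PySem.Str.isIn "workflow" (PySem.Str.lower filename) = true
  · (simp only [List.any_cons, List.any_nil, hd_blog, hd_prompt, hd_agent, hd_workflow, hd_research, hn_blog, hn_post, hn_article, hn_prompt, hn_agent, hn_workflow]; rfl)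
  rw [Bool.not_eq_true] at hn_workflow
  by_cases hn_research : PySem.Str.isIn "research" (PySem.Str.lower filename) = true
  · (simp only [List.any_cons, List.any_nil, hd_blog, hd_prompt, hd_agent, hd_workflow, hd_research, hn_blog, hn_post, hn_article, hn_prompt, hn_agent, hn_workflow, hn_research]; rfl)
  rw [Bool.not_eq_true] at hn_research
  by_cases hn_thread : PySem.Str.isIn "thread" (PySem.Str.lower filename) = true
  · (simp only [List.any_cons, List.any_nil, hd_blog, hd_prompt, hd_agent, hd_workflow, hd_research, hn_blog, hn_post, hn_article, hn_prompt, hn_agent, hn_workflow, hn_research, hn_thread]; rfl)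
  rw [Bool.not_eq_true] at hn_thread
  by_cases hn_conversation : PySem.Str.isIn "conversation" (PySem.Str.lower filename) = true
  · (simp only [List.any_cons, List.any_nil, hd_blog, hd_prompt, hd_agent, hd_workflow, hd_research, hn_blog, hn_post, hn_article, hn_prompt, hn_agent, hn_workflow, hn_research, hn_thread, hn_conversation]; rfl)
  rw [Bool.not_eq_true] at hn_conversation
  by_cases hn_config : PySem.Str.isIn "config" (PySem.Str.lower filename) = true
  · (simp only [List.any_cons, List.any_nil, hd_blog, hd_prompt, hd_agent, hd_workflow, hd_research, hn_blog, hn_post, hn_article, hn_prompt, hn_agent, hn_workflow, hn_research, hn_thread, hn_conversation, hn_config]; rfl)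
  rw [Bool.not_eq_true] at hn_config
  by_cases hn_settings : PySem.Str.isIn "settings" (PySem.Str.lower filename) = true
  · (simp only [List.any_cons, List.any_nil, hd_blog, hd_prompt, hd_agent, hd_workflow, hd_research, hn_blog, hn_post, hn_article, hn_prompt, hn_agent, hn_workflow, hn_research, hn_thread, hn_conversation, hn_config, hn_settings]; rfl)
  rw [Bool.not_eq_true] at hn_settings
  by_cases hn_readme : PySem.Str.isIn "readme" (PySem.Str.lower filename) = true
  · (simp only [List.any_cons, List.any_nil, hd_blog, hd_prompt, hd_agent, hd_workflow, hd_research, hn_blog, hn_post, hn_article, hn_prompt, hn_agent, hn_workflow, hn_research, hn_thread, hn_conversation, hn_config, hn_settings, hn_readme]; rfl)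
  rw [Bool.not_eq_true] at hn_readme
  by_cases hn_guide : PySem.Str.isIn "guide" (PySem.Str.lower filename) = true
  · (simp only [List.any_cons, List.any_nil, hd_blog, hd_prompt, hd_agent, hd_workflow, hd_research, hn_blog, hn_post, hn_article, hn_prompt, hn_agent, hn_workflow, hn_research, hn_thread, hn_conversation, hn_config, hn_settings, hn_readme, hn_guide]; rfl)
  rw [Bool.not_eq_true] at hn_guide
  by_cases hn_tutorial : PySem.Str.isIn "tutorial" (PySem.Str.lower filename) = true
  · (simp only [List.any_cons, List.any_nil, hd_blog, hd_prompt, hd_agent, hd_workflow, hd_research, hn_blog, hn_post, hn_article, hn_prompt, hn_agent, hn_workflow, hn_research, hn_thread, hn_conversation, hn_config, hn_settings, hn_readme, hn_guide, hn_tutorial]; rfl)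
  rw [Bool.not_eq_true] at hn_tutorial
  by_cases hn_doc : PySem.Str.isIn "doc" (PySem.Str.lower filename) = true
  · (simp only [List.any_cons, List.any_nil, hd_blog, hd_prompt, hd_agent, hd_workflow, hd_research, hn_blog, hn_post, hn_article, hn_prompt, hn_agent, hn_workflow, hn_research, hn_thread, hn_conversation, hn_config, hn_settings, hn_readme, hn_guide, hn_tutorial, hn_doc]; rfl)
  rw [Bool.not_eq_true] at hn_doc
  by_cases hn_draft : PySem.Str.isIn "draft" (PySem.Str.lower filename) = true
  · (simp only [List.any_cons, List.any_nil, hd_blog, hd_prompt, hd_agent, hd_workflow, hd_research, hn_blog, hn_post, hn_article, hn_prompt, hn_agent, hn_workflow, hn_research, hn_thread, hn_conversation, hn_config, hn_settings, hn_readme, hn_guide, hn_tutorial, hn_doc, hn_draft]; rfl)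
  rw [Bool.not_eq_true] at hn_draft
  by_cases hn_wip : PySem.Str.isIn "wip" (PySem.Str.lower filename) = true
  · (simp only [List.any_cons, List.any_nil, hd_blog, hd_prompt, hd_agent, hd_workflow, hd_research, hn_blog, hn_post, hn_article, hn_prompt, hn_agent, hn_workflow, hn_research, hn_thread, hn_conversation, hn_config, hn_settings, hn_readme, hn_guide, hn_tutorial, hn_doc, hn_draft, hn_wip]; rfl)
  rw [Bool.not_eq_true] at hn_wip
  by_cases hn_temp : PySem.Str.isIn "temp" (PySem.Str.lower filename) = true
  · (simp only [List.any_cons, List.any_nil, hd_blog, hd_prompt, hd_agent, hd_workflow, hd_research, hn_blog, hn_post, hn_article, hn_prompt, hn_agent, hn_workflow, hn_research, hn_thread, hn_conversation, hn_config, hn_settings, hn_readme, hn_guide, hn_tutorial, hn_doc, hn_draft, hn_wip, hn_temp]; rfl)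
  rw [Bool.not_eq_true] at hn_temp
  (simp only [List.any_cons, List.any_nil, hd_blog, hd_prompt, hd_agent, hd_workflow, hd_research, hn_blog, hn_post, hn_article, hn_prompt, hn_agent, hn_workflow, hn_research, hn_thread, hn_conversation, hn_config, hn_settings, hn_readme, hn_guide, hn_tutorial, hn_doc, hn_draft, hn_wip, hn_temp]; rfl)
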